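-- pv_equiv track=rewrite | github.com/azone-ai/1-1tool | toolchain/stage2_control_generator.py | find_tasks_in_aligned_file
-- ===== SOURCE A (Python) =====
-- SEPARATOR = "1" * 128
--
-- def find_tasks_in_aligned_file(task_lines: list) -> list:
--     """
--     在地址对齐的文件内容中查找每个任务的边界。
--     由于文件已对齐，每个任务块由非分隔符行构成，块之间由分隔符行隔开。
--     """
--     task_info = []
--     i = 0
--     while i < len(task_lines):
--         # 跳过任务间的填龧分隔符
--         while i < len(task_lines) and task_lines[i] == SEPARATOR:
--             i += 1
--         if i >= len(task_lines):
--             break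
--
--         # 记录任务的起始行
--         task_start = i
--         # 寻找任务的结束行（即下一个分隔符行）
--         j = i
--         while j < len(task_lines) and task_lines[j] != SEPARATOR:
--             j += 1
--         task_end = j
--         # 记录任务的（起始行号，指令条数）
--         task_info.append((task_start, task_end - task_start))
--         i = j
--     return task_info
-- ===== SOURCE B (Python) =====
-- SEPARATOR = "1" * 128
--
-- def find_tasks_in_aligned_file(task_lines: list) -> list:
--     # Stage 1: collect the indices of all separator lines.
--     seps = [i for i, line in enumerate(task_lines) if line == SEPARATOR]
--     # Stage 2: each task block is the gap between consecutive boundaries.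
--     bounds = [-1] + seps + [len(task_lines)]
--     return [(p + 1, q - p - 1) for p, q in zip(bounds, bounds[1:]) if q - p > 1]
-- ===== Notes on version B (the rewrite author's own statement) =====
-- stated objective: alternative
-- what changed: Replaced A's nested while loops that scan runs with index counters by two staged passes: first collect the indices of all separator lines, then derive each (start, length) block purely by arithmetic on the gaps between consecutive boundaries (-1, separator indices, len).
import Mathlib
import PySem

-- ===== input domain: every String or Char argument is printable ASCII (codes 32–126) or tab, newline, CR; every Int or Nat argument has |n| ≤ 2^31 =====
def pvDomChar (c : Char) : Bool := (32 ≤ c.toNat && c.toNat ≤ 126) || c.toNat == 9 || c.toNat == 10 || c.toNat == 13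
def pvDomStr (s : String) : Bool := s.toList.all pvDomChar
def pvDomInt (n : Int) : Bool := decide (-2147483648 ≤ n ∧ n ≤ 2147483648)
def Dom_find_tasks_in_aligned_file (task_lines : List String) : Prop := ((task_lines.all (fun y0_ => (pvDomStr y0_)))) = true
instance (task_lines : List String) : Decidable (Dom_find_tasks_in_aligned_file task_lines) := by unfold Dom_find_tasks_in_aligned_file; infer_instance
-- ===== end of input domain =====

-- B replaces A's nested index-scanning loops by two staged passes: first collect the
-- indices of all separator lines, then compute each task block by arithmetic on the
-- gaps between consecutive boundaries (objective: alternative; same O(n) cost).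

-- SEPARATOR = "1" * 128
def pvSEP : String := "11111111111111111111111111111111111111111111111111111111111111111111111111111111111111111111111111111111111111111111111111111111"

-- ===== PORT A =====
-- inner `while i < len and task_lines[i] == SEPARATOR: i += 1`
def skipSepA (xs : List String) (i : Nat) : Nat :=
  if h : i < xs.length then
    if xs[i] = pvSEP then skipSepA xs (i + 1) else i
  else i
termination_by xs.length - i

-- inner `while j < len and task_lines[j] != SEPARATOR: j += 1`
def findEndA (xs : List String) (j : Nat) : Nat :=
  if h : j < xs.length then
    if xs[j] ≠ pvSEP then findEndA xs (j + 1) else j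
  else j
termination_by xs.length - j

theorem skipSepA_ge (xs : List String) (i : Nat) : i ≤ skipSepA xs i := by
  unfold skipSepA
  split
  · split
    · have := skipSepA_ge xs (i + 1); omega
    · exact le_refl i
  · exact le_refl i
termination_by xs.length - i

theorem findEndA_ge (xs : List String) (j : Nat) : j ≤ findEndA xs j := by
  unfold findEndA
  split
  · split
    · have := findEndA_ge xs (j + 1); omega
    · exact le_refl j
  · exact le_refl j
termination_by xs.length - j

-- used by loopA's termination proof: after a non-separator line the end scan advances
theorem findEndA_gt (xs : List String) (j : Nat) (h : j < xs.length)
    (hx : xs.getD j "" ≠ pvSEP) : j < findEndA xs j := by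
  rw [List.getD_eq_getElem xs "" h] at hx
  unfold findEndA
  rw [dif_pos h, if_pos hx]
  have := findEndA_ge xs (j + 1); omega

theorem skipSepA_not_sep (xs : List String) (i : Nat)
    (h : skipSepA xs i < xs.length) : xs.getD (skipSepA xs i) "" ≠ pvSEP := by
  by_cases hi : i < xs.length
  · by_cases hx : xs[i] = pvSEP
    · rw [skipSepA, dif_pos hi, if_pos hx] at h ⊢
      exact skipSepA_not_sep xs (i + 1) h
    · rw [skipSepA, dif_pos hi, if_neg hx] at h ⊢
      rw [List.getD_eq_getElem xs "" h]
      exact hx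
  · rw [skipSepA, dif_neg hi] at h
    omega
termination_by xs.length - i

-- outer `while i < len(task_lines): …`
def loopA (xs : List String) (i : Nat) : List (Int × Int) :=
  let i' := skipSepA xs i
  if _h : i' < xs.length then
    let j := findEndA xs i'
    ((i' : Int), (j : Int) - (i' : Int)) :: loopA xs j
  else []
termination_by xs.length - i
decreasing_by
  have h1 : i ≤ skipSepA xs i := skipSepA_ge xs i
  have h2 : skipSepA xs i < findEndA xs (skipSepA xs i) :=
    findEndA_gt xs (skipSepA xs i) _h (skipSepA_not_sep xs i _h)
  omega

def find_tasks_in_aligned_file (task_lines : List String) : List (Int × Int) :=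
  loopA task_lines 0

-- ===== PORT B =====
-- seps = [i for i, line in enumerate(task_lines) if line == SEPARATOR]
-- bounds = [-1] + seps + [len(task_lines)]
-- return [(p + 1, q - p - 1) for p, q in zip(bounds, bounds[1:]) if q - p > 1]
def find_tasks_in_aligned_file_alt (task_lines : List String) : List (Int × Int) :=
  let seps : List Int :=
    ((PySem.List.enumerate task_lines 0).filter (fun p => p.2 == pvSEP)).map (fun p => p.1)
  let bounds : List Int := (-1) :: seps ++ [(task_lines.length : Int)]
  (bounds.zip bounds.tail).filterMap
    (fun p => if p.2 - p.1 > 1 then some (p.1 + 1, p.2 - p.1 - 1) else none)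

-- ===== PRECONDITION & SPEC =====
def Spec_find_tasks_in_aligned_file (task_lines : List String) (out : List (Int × Int)) : Prop := out = find_tasks_in_aligned_file_alt task_lines
instance (task_lines : List String) (out : List (Int × Int)) : Decidable (Spec_find_tasks_in_aligned_file task_lines out) := by unfold Spec_find_tasks_in_aligned_file; infer_instance

-- ===== CLAIM (what is proved, stated in full; the proofs are below) =====
def Claim_equal_find_tasks_in_aligned_file : Prop := ∀ (task_lines : List String), Dom_find_tasks_in_aligned_file task_lines → Spec_find_tasks_in_aligned_file task_lines (find_tasks_in_aligned_file task_lines)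

-- ===== LEMMAS AND PROOFS =====

-- separator indices of the suffix starting at (Int) index i (proof helper)
def sepsI : List String → Int → List Int
  | [], _ => []
  | x :: t, i => if x = pvSEP then i :: sepsI t (i + 1) else sepsI t (i + 1)

-- consecutive-pair recursion equal to B's zip/filterMap comprehension (proof helper)
def fB : List Int → List (Int × Int)
  | a :: b :: t => (if b - a > 1 then [(a + 1, b - a - 1)] else []) ++ fB (b :: t)
  | _ => []

theorem fB_cons2 (a b : Int) (t : List Int) :
    fB (a :: b :: t) = (if b - a > 1 then [(a + 1, b - a - 1)] else []) ++ fB (b :: t) := rfl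

theorem fB_single (a : Int) : fB [a] = [] := rfl

theorem zip_filterMap_eq_fB (l : List Int) :
    (l.zip l.tail).filterMap
      (fun p => if p.2 - p.1 > 1 then some (p.1 + 1, p.2 - p.1 - 1) else none) = fB l := by
  match l with
  | [] => rfl
  | [a] => rfl
  | a :: b :: t =>
      have ih := zip_filterMap_eq_fB (b :: t)
      simp only [List.tail_cons, List.zip_cons_cons, List.filterMap_cons] at ih ⊢
      rw [fB_cons2]
      by_cases h : b - a > 1
      · rw [if_pos h, if_pos h, ih]; rfl
      · rw [if_neg h, if_neg h, ih]; rfl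

theorem enum_filter_eq_sepsI (xs : List String) (s : Int) :
    ((PySem.List.enumerate xs s).filter (fun p => p.2 == pvSEP)).map (fun p => p.1)
      = sepsI xs s := by
  induction xs generalizing s with
  | nil => simp [PySem.List.enumerate_nil, sepsI]
  | cons x t ih =>
      rw [PySem.List.enumerate_cons, sepsI]
      by_cases hx : x = pvSEP
      · have : ((x == pvSEP) : Bool) = true := by simpa using hx
        simp [hx, ih]
      · have : ((x == pvSEP) : Bool) = false := by simpa using hx
        simp [hx, ih]

theorem sepsI_drop_sep (xs : List String) (i : Nat) (h : i < xs.length)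
    (hx : xs[i] = pvSEP) :
    sepsI (xs.drop i) (i : Int) = (i : Int) :: sepsI (xs.drop (i + 1)) ((i : Int) + 1) := by
  rw [← List.getElem_cons_drop h, sepsI, if_pos hx]

theorem sepsI_drop_not_sep (xs : List String) (i : Nat) (h : i < xs.length)
    (hx : xs[i] ≠ pvSEP) :
    sepsI (xs.drop i) (i : Int) = sepsI (xs.drop (i + 1)) ((i : Int) + 1) := by
  rw [← List.getElem_cons_drop h, sepsI, if_neg hx]

theorem findEndA_le (xs : List String) (j : Nat) (h : j ≤ xs.length) :
    findEndA xs j ≤ xs.length := by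
  unfold findEndA
  split
  · split
    · exact findEndA_le xs (j + 1) (by omega)
    · exact h
  · exact h
termination_by xs.length - j

theorem findEndA_sep (xs : List String) (i : Nat)
    (h : findEndA xs i < xs.length) : xs.getD (findEndA xs i) "" = pvSEP := by
  by_cases hi : i < xs.length
  · by_cases hx : xs[i] = pvSEP
    · rw [findEndA, dif_pos hi, if_neg (not_not_intro hx)] at h ⊢
      rw [List.getD_eq_getElem xs "" h]
      exact hx
    · rw [findEndA, dif_pos hi, if_pos hx] at h ⊢
      exact findEndA_sep xs (i + 1) h
  · rw [findEndA, dif_neg hi] at h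
    omega
termination_by xs.length - i

theorem sepsI_findEnd (xs : List String) (i : Nat) :
    sepsI (xs.drop i) (i : Int) = sepsI (xs.drop (findEndA xs i)) ((findEndA xs i : Nat) : Int) := by
  by_cases hi : i < xs.length
  · by_cases hx : xs[i] = pvSEP
    · rw [findEndA, dif_pos hi, if_neg (not_not_intro hx)]
    · rw [findEndA, dif_pos hi, if_pos hx, sepsI_drop_not_sep xs i hi hx]
      have := sepsI_findEnd xs (i + 1)
      simpa using this
  · rw [findEndA, dif_neg hi]
termination_by xs.length - i

theorem loopA_eq_fB (xs : List String) (m i : Nat) (hi : i ≤ xs.length)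
    (hm : xs.length - i ≤ m) :
    loopA xs i = fB (((i : Int) - 1) :: sepsI (xs.drop i) (i : Int) ++ [(xs.length : Int)]) := by
  induction m generalizing i with
  | zero =>
      have hn : i = xs.length := by omega
      have hs : skipSepA xs i = i := by unfold skipSepA; rw [dif_neg (by omega)]
      rw [loopA]
      simp only [hs]
      rw [dif_neg (by omega), List.drop_eq_nil_of_le (by omega)]
      simp only [sepsI, List.cons_append, List.nil_append]
      rw [fB_cons2, if_neg (by omega), fB_single]
      rfl
  | succ k ih =>
      by_cases hlt : i < xs.length
      · by_cases hx : xs[i] = pvSEP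
        · -- separator head: both sides step to i+1
          have hs : skipSepA xs i = skipSepA xs (i + 1) := by
            conv_lhs => unfold skipSepA
            rw [dif_pos hlt, if_pos hx]
          have hA : loopA xs i = loopA xs (i + 1) := by
            rw [loopA, loopA]
            simp only [hs]
          rw [hA, ih (i + 1) (by omega) (by omega), sepsI_drop_sep xs i hlt hx]
          simp only [List.cons_append]
          rw [fB_cons2, if_neg (by omega), List.nil_append]
          have hone : ((i : Int) + 1 - 1) = (i : Int) := by ring
          rw [Nat.cast_add, Nat.cast_one, hone]
        · -- non-separator head: one task block is emitted
          set j := findEndA xs i with hj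
          have hji : i < j := findEndA_gt xs i hlt (by rw [List.getD_eq_getElem xs "" hlt]; exact hx)
          have hjn : j ≤ xs.length := findEndA_le xs i (by omega)
          have hs : skipSepA xs i = i := by
            unfold skipSepA; rw [dif_pos hlt, if_neg hx]
          have hL : loopA xs i = ((i : Int), (j : Int) - (i : Int)) :: loopA xs j := by
            rw [loopA]
            simp only [hs]
            rw [dif_pos hlt]
          rw [hL, sepsI_findEnd xs i, ← hj]
          by_cases hjend : j < xs.length
          · -- the scan stopped at a separator line
            have hsep : xs[j] = pvSEP := by
              have := findEndA_sep xs i hjend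
              rw [← hj, List.getD_eq_getElem xs "" hjend] at this
              exact this
            rw [sepsI_drop_sep xs j hjend hsep]
            have hBj := ih j (by omega) (by omega)
            rw [sepsI_drop_sep xs j hjend hsep] at hBj
            simp only [List.cons_append] at hBj ⊢
            rw [fB_cons2, if_neg (by omega), List.nil_append] at hBj
            -- RHS: first pair (i-1, j) emits the block, then continues from j
            rw [fB_cons2, if_pos (by omega), List.singleton_append]
            have hpair : ((i : Int) - 1 + 1, (j : Int) - ((i : Int) - 1) - 1)
                = ((i : Int), (j : Int) - (i : Int)) := by
              simp only [Prod.mk.injEq]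
              constructor <;> ring
            rw [hpair, hBj]
          · -- the scan ran to the end of the file
            have hjeq : j = xs.length := by omega
            rw [hjeq, List.drop_eq_nil_of_le (by omega)]
            simp only [sepsI, List.cons_append, List.nil_append]
            rw [fB_cons2, if_pos (by omega), fB_single, List.append_nil]
            have hloopn : loopA xs xs.length = [] := by
              have hs2 : skipSepA xs xs.length = xs.length := by
                unfold skipSepA; rw [dif_neg (by omega)]
              rw [loopA]
              simp only [hs2]
              rw [dif_neg (by omega)]
            rw [hloopn]
            have hpair : ((i : Int) - 1 + 1, (xs.length : Int) - ((i : Int) - 1) - 1)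
                = ((i : Int), (xs.length : Int) - (i : Int)) := by
              simp only [Prod.mk.injEq]
              constructor <;> ring
            rw [hpair]
      · have hn : i = xs.length := by omega
        have hs : skipSepA xs i = i := by unfold skipSepA; rw [dif_neg (by omega)]
        rw [loopA]
        simp only [hs]
        rw [dif_neg (by omega), List.drop_eq_nil_of_le (by omega)]
        simp only [sepsI, List.cons_append, List.nil_append]
        rw [fB_cons2, if_neg (by omega), fB_single]
        rfl

-- ===== VERDICT (by name: the statement is the Claim_ definition above) =====
theorem find_tasks_in_aligned_file_spec : Claim_equal_find_tasks_in_aligned_file := by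
  intro xs _hdom
  unfold Spec_find_tasks_in_aligned_file find_tasks_in_aligned_file find_tasks_in_aligned_file_alt
  rw [zip_filterMap_eq_fB, enum_filter_eq_sepsI]
  have := loopA_eq_fB xs xs.length 0 (by omega) (by omega)
  simpa using this
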